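-- pv_equiv track=rewrite | github.com/aa694849243/leetcode_cj | 2001-2100/2048. 下一个更大的数值平衡数.py | isBeautiful
-- ===== SOURCE A (Python) =====
-- def isBeautiful(n):
--     s = str(n)
--     if '0' in s:
--         return False
--     for i in range(1, 10):
--         if s.count(str(i)) != 0 and s.count(str(i)) != i:
--             return False
--     return True
-- ===== SOURCE B (Python) =====
-- def isBeautiful(n):
--     # Sort the digit characters, then check in one pass that every maximal run
--     # of equal digits d has length exactly ord(d)-48 (a run of '0's has
--     # positive length != 0, so any '0' fails automatically).
--     digits = sorted(ch for ch in str(n) if ch.isdigit())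
--     cur = None
--     run = 0
--     for ch in digits:
--         if ch == cur:
--             run += 1
--         else:
--             if cur is not None and run != ord(cur) - 48:
--                 return False
--             cur = ch
--             run = 1
--     return cur is None or run == ord(cur) - 48
-- ===== Notes on version B (the rewrite author's own statement) =====
-- stated objective: alternative
-- what changed: Instead of counting each digit's occurrences (A's nine substring-count scans plus a zero-membership test), B sorts the digit characters and checks in one scan that every maximal run of equal digits d has length exactly d, which also rejects '0' since its run length is positive.
import Mathlib
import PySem

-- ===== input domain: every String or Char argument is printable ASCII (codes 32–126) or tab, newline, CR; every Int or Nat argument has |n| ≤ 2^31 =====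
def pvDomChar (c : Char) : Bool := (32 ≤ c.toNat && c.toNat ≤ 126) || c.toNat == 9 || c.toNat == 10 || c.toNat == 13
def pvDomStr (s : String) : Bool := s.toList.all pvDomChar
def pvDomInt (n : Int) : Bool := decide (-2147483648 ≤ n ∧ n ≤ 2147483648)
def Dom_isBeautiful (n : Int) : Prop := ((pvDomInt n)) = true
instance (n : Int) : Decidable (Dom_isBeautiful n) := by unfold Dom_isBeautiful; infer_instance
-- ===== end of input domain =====

-- B replaces A's nine repeated substring-count scans and zero-membership test by sorting the
-- digit characters of str(n) and checking in one pass that every maximal run of a digit d has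
-- length exactly d (alternative).


-- ===== PORT A =====
-- 'for i in range(1, 10): if s.count(str(i)) != 0 and s.count(str(i)) != i: return False'
def pvALoop (s : List Char) : List Int → Bool
  | [] => true
  | i :: rest =>
      if PySem.Chars.count s (PySem.Int.toChars i) ≠ 0 ∧ (PySem.Chars.count s (PySem.Int.toChars i) : Int) ≠ i
      then false
      else pvALoop s rest

def isBeautiful (n : Int) : Bool :=
  let s := PySem.Int.toChars n           -- s = str(n)
  if PySem.Chars.isIn ['0'] s then false -- if '0' in s: return False
  else pvALoop s (PySem.List.pyRange 1 10 1)

-- ===== PORT B =====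
-- 'cur = None; run = 0; for ch in digits: …' — the run-length scan over the sorted digits.
-- 'ord(cur) - 48' is cur.toNat - 48 (exact on the digit characters the filtered list holds).
def pvLoop : Option Char → Nat → List Char → Bool
  | cur, run, [] =>                               -- return cur is None or run == ord(cur) - 48
      match cur with
      | none => true
      | some d => run == d.toNat - 48
  | cur, run, ch :: rest =>
      if some ch == cur then pvLoop cur (run + 1) rest   -- if ch == cur: run += 1
      else
        match cur with                            -- if cur is not None and run != ord(cur) - 48: return False
        | some d => if run ≠ d.toNat - 48 then false else pvLoop (some ch) 1 rest
        | none => pvLoop (some ch) 1 rest         -- cur = ch; run = 1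

def isBeautiful_alt (n : Int) : Bool :=
  -- digits = sorted(ch for ch in str(n) if ch.isdigit())
  let digits := PySem.List.sorted ((PySem.Int.toChars n).filter PySem.Chars.isdigit) (fun x => x) false
  pvLoop none 0 digits

-- ===== PRECONDITION & SPEC =====
def Spec_isBeautiful (n : Int) (out : Bool) : Prop := out = isBeautiful_alt n
instance (n : Int) (out : Bool) : Decidable (Spec_isBeautiful n out) := by unfold Spec_isBeautiful; infer_instance

-- ===== CLAIM (what is proved, stated in full; the proofs are below) =====
def Claim_equal_isBeautiful : Prop := ∀ (n : Int), Dom_isBeautiful n → Spec_isBeautiful n (isBeautiful n)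

-- ===== LEMMAS AND PROOFS =====

-- both programs decide this predicate of the digit string s:
-- every digit character present occurs exactly (its value) times ('0' can never satisfy it)
def PvBalanced (s : List Char) : Prop :=
  ∀ c, PySem.Chars.isdigit c = true → c ∈ s → s.count c = c.toNat - 48

-- s.count(d) for a single-character needle is the List.count of that character
lemma count_go_singleton (c : Char) (l : List Char) (fuel acc : Nat) (h : l.length ≤ fuel) :
    PySem.Chars.count.go [c] fuel l acc = acc + l.count c := by
  induction l generalizing fuel acc with
  | nil => cases fuel <;> simp [PySem.Chars.count.go]
  | cons hd tl ih =>
      cases fuel with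
      | zero => simp at h
      | succ f =>
          have hlen : tl.length ≤ f := by simpa using h
          by_cases hc : c = hd
          · subst hc
            have hstep : PySem.Chars.count.go [c] (f+1) (c :: tl) acc
                = PySem.Chars.count.go [c] f tl (acc + 1) := by
              simp [PySem.Chars.count.go, List.isPrefixOf]
            rw [hstep, ih f (acc+1) hlen]
            simp
            omega
          · have hstep : PySem.Chars.count.go [c] (f+1) (hd :: tl) acc
                = PySem.Chars.count.go [c] f tl acc := by
              simp [PySem.Chars.count.go, List.isPrefixOf, hc]
            rw [hstep, ih f acc hlen]
            simp [List.count_cons, beq_eq_false_iff_ne.mpr (Ne.symm hc)]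

lemma count_singleton (s : List Char) (c : Char) :
    PySem.Chars.count s [c] = s.count c := by
  simpa [PySem.Chars.count] using count_go_singleton c s s.length 0 le_rfl

lemma isIn_singleton (c : Char) (s : List Char) :
    PySem.Chars.isIn [c] s = s.contains c := by
  rw [Bool.eq_iff_iff, PySem.Chars.isIn_iff_infix, List.singleton_infix_iff]
  simp

-- A's loop as a universal statement over the remaining digits
lemma pvALoop_eq_true_iff (s : List Char) (l : List Int) :
    pvALoop s l = true ↔
      ∀ i ∈ l, PySem.Chars.count s (PySem.Int.toChars i) = 0 ∨
               (PySem.Chars.count s (PySem.Int.toChars i) : Int) = i := by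
  induction l with
  | nil => simp [pvALoop]
  | cons hd tl ih =>
      simp only [pvALoop, List.mem_cons]
      split_ifs with h
      · simp only [false_iff]
        intro hall
        rcases hall hd (Or.inl rfl) with h0 | h0 <;> tauto
      · simp only [Classical.not_and_iff_not_or_not, ne_eq, not_not] at h
        constructor
        · intro ht i hi
          rcases hi with rfl | hi
          · rcases h with h | h
            · exact Or.inl h
            · exact Or.inr h
          · exact (ih.mp ht) i hi
        · intro hall
          exact ih.mpr fun i hi => hall i (Or.inr hi)

-- str(i) for a digit i in 1..9 is the single character chr(48+i)
lemma toChars_digit (i : Int) (h1 : 1 ≤ i) (h9 : i < 10) :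
    PySem.Int.toChars i = [Char.ofNat (48 + i.toNat)] := by
  interval_cases i <;> decide

lemma isdigit_bounds (c : Char) (h : PySem.Chars.isdigit c = true) :
    48 ≤ c.toNat ∧ c.toNat ≤ 57 := by
  simp only [PySem.Chars.isdigit, Bool.and_eq_true, decide_eq_true_eq] at h
  obtain ⟨h1, h2⟩ := h
  rw [Char.le_def] at h1 h2
  exact ⟨h1, h2⟩

-- A decides PvBalanced
lemma A_iff (s : List Char) :
    (if PySem.Chars.isIn ['0'] s then false else pvALoop s (PySem.List.pyRange 1 10 1)) = true
      ↔ PvBalanced s := by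
  rw [isIn_singleton]
  cases hc : s.contains '0' with
  | true =>
      simp only [if_true]
      constructor
      · intro h; cases h
      · intro hb
        have h0 : '0' ∈ s := by simpa using hc
        have := hb '0' (by decide) h0
        have hpos : 0 < s.count '0' := List.count_pos_iff.mpr h0
        simp at this
        omega
  | false =>
      have h0' : '0' ∉ s := by simpa using hc
      rw [if_neg (by simp), pvALoop_eq_true_iff]
      constructor
      · intro hall c hd hm
        obtain ⟨hlo, hhi⟩ := isdigit_bounds c hd
        have hk0 : c ≠ '0' := fun he => h0' (he ▸ hm)
        have hne : c.toNat ≠ 48 := by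
          intro he
          exact hk0 (by rw [← Char.ofNat_toNat c, he])
        have hb1 : (1 : Int) ≤ ((c.toNat : Int) - 48) := by omega
        have hb9 : ((c.toNat : Int) - 48) < 10 := by omega
        have hq := hall ((c.toNat : Int) - 48) (by rw [PySem.List.mem_pyRange_one]; omega)
        rw [toChars_digit _ hb1 hb9, count_singleton] at hq
        have hkk : Char.ofNat (48 + ((c.toNat : Int) - 48).toNat) = c := by
          have he : 48 + ((c.toNat : Int) - 48).toNat = c.toNat := by omega
          rw [he, Char.ofNat_toNat]
        rw [hkk] at hq
        rcases hq with hz | hz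
        · exact absurd (List.count_eq_zero.mp hz) (by simpa using hm)
        · omega
      · intro hb i hi
        rw [PySem.List.mem_pyRange_one] at hi
        obtain ⟨hi1, hi2⟩ := hi
        rw [toChars_digit i hi1 hi2, count_singleton]
        by_cases hz : s.count (Char.ofNat (48 + i.toNat)) = 0
        · exact Or.inl hz
        · right
          have hmem : Char.ofNat (48 + i.toNat) ∈ s := by
            by_contra hne
            exact hz (List.count_eq_zero.mpr hne)
          have htoNat : (Char.ofNat (48 + i.toNat)).toNat = 48 + i.toNat := by
            interval_cases i <;> decide
          have hdig : PySem.Chars.isdigit (Char.ofNat (48 + i.toNat)) = true := by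
            interval_cases i <;> decide
          have := hb _ hdig hmem
          rw [htoNat] at this
          omega

-- in a sorted list d :: rest, d does not reappear after the leading run of d's
lemma not_mem_dropWhile (d : Char) (rest : List Char)
    (hp : (d :: rest).Pairwise (· ≤ ·)) :
    d ∉ rest.dropWhile (fun c => c == d) := by
  intro hmem
  have hsub : (rest.dropWhile (fun c => c == d)).Sublist rest := List.dropWhile_sublist _
  have hps : (rest.dropWhile (fun c => c == d)).Pairwise (· ≤ ·) :=
    (List.pairwise_cons.mp hp).2.sublist hsub
  cases hdw : rest.dropWhile (fun c => c == d) with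
  | nil => rw [hdw] at hmem; simp at hmem
  | cons e tl =>
      have hne : ¬ ((e == d) = true) := by
        have := List.head?_dropWhile_not (fun c => c == d) rest
        rw [hdw] at this
        simpa using this
      have hed : e ≠ d := by simpa using hne
      rw [hdw] at hmem hps
      have hde : d ≤ e := by
        have : e ∈ rest := hsub.subset (hdw ▸ List.mem_cons_self)
        exact (List.pairwise_cons.mp hp).1 e this
      rcases List.mem_cons.mp hmem with rfl | hmtl
      · exact hed rfl
      · have hle : e ≤ d := (List.pairwise_cons.mp hps).1 d hmtl
        exact hed (le_antisymm hle hde)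

-- the scan with an open run (cur = some d, length run so far) closes the run over the
-- leading d's and restarts on the remainder
lemma pvLoop_some (d : Char) (run : Nat) (l : List Char) :
    pvLoop (some d) run l =
      if run + (l.takeWhile (fun c => c == d)).length ≠ d.toNat - 48 then false
      else pvLoop none 0 (l.dropWhile (fun c => c == d)) := by
  induction l generalizing run with
  | nil =>
      simp only [pvLoop, List.takeWhile_nil, List.dropWhile_nil, List.length_nil, Nat.add_zero]
      split_ifs with h
      · simpa using h
      · simpa using h
  | cons ch rest ih =>
      by_cases hch : ch = d
      · subst hch
        have ht : (ch :: rest).takeWhile (fun c => c == ch) = ch :: rest.takeWhile (fun c => c == ch) := by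
          simp
        have hd : (ch :: rest).dropWhile (fun c => c == ch) = rest.dropWhile (fun c => c == ch) := by
          simp
        rw [ht, hd]
        have hstep : pvLoop (some ch) run (ch :: rest) = pvLoop (some ch) (run + 1) rest := by
          simp [pvLoop]
        rw [hstep, ih (run + 1)]
        simp only [List.length_cons]
        congr 1
        simp only [eq_iff_iff, ne_eq, not_iff_not]
        omega
      · have ht : (ch :: rest).takeWhile (fun c => c == d) = [] := by
          simp [hch]
        have hd : (ch :: rest).dropWhile (fun c => c == d) = ch :: rest := by
          simp [hch]
        rw [ht, hd]
        have hstep : pvLoop (some d) run (ch :: rest)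
            = if run ≠ d.toNat - 48 then false else pvLoop (some ch) 1 rest := by
          simp [pvLoop, hch]
        have hnone : pvLoop none 0 (ch :: rest) = pvLoop (some ch) 1 rest := by
          simp [pvLoop]
        rw [hstep, hnone]
        simp

-- B's run scan decides PvBalanced on a sorted list
lemma pvLoop_iff (l : List Char) (hp : l.Pairwise (· ≤ ·)) :
    pvLoop none 0 l = true ↔ ∀ c ∈ l, l.count c = c.toNat - 48 := by
  induction hn : l.length using Nat.strong_induction_on generalizing l with
  | _ n ih =>
  cases l with
  | nil => simp [pvLoop]
  | cons d rest =>
      have hsplit : rest = rest.takeWhile (fun c => c == d) ++ rest.dropWhile (fun c => c == d) :=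
        (List.takeWhile_append_dropWhile).symm
      have htall : ∀ c ∈ rest.takeWhile (fun c => c == d), c = d := by
        intro c hcm
        simpa using List.mem_takeWhile_imp hcm
      have hdnm : d ∉ rest.dropWhile (fun c => c == d) := not_mem_dropWhile d rest hp
      have hlen : (rest.dropWhile (fun c => c == d)).length < n := by
        have := List.length_dropWhile_le (fun c => c == d) rest
        simp only [← hn, List.length_cons]; omega
      have hpd : (rest.dropWhile (fun c => c == d)).Pairwise (· ≤ ·) :=
        (List.pairwise_cons.mp hp).2.sublist (List.dropWhile_sublist _)
      have hih := ih _ hlen (rest.dropWhile (fun c => c == d)) hpd rfl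
      -- count of d in the whole list is the leading run length + 1
      have hcd : (d :: rest).count d = (rest.takeWhile (fun c => c == d)).length + 1 := by
        rw [List.count_cons_self]
        conv_lhs => rw [hsplit]
        rw [List.count_append, List.count_eq_zero.mpr hdnm]
        have : (rest.takeWhile (fun c => c == d)).count d
            = (rest.takeWhile (fun c => c == d)).length :=
          List.count_eq_length.mpr (fun c hc => by rw [htall c hc])
        omega
      -- count of any other char is its count in the tail after the run
      have hcother : ∀ c, c ≠ d →
          (d :: rest).count c = (rest.dropWhile (fun c => c == d)).count c := by
        intro c hcd'
        have hbne : (d == c) = false := beq_eq_false_iff_ne.mpr (Ne.symm hcd')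
        rw [List.count_cons, hbne]
        conv_lhs => rw [hsplit]
        rw [List.count_append, List.count_eq_zero.mpr (fun hm => hcd' (htall c hm))]
        simp
      have hstart : pvLoop none 0 (d :: rest) = pvLoop (some d) 1 rest := by
        simp [pvLoop]
      rw [hstart, pvLoop_some]
      split_ifs with hrun
      · simp only [false_iff]
        intro hall
        have := hall d List.mem_cons_self
        rw [hcd] at this
        omega
      · rw [not_not] at hrun
        rw [hih]
        constructor
        · intro hall c hcm
          rcases List.mem_cons.mp hcm with rfl | hcr
          · rw [hcd]; omega
          · rw [hsplit] at hcr
            rcases List.mem_append.mp hcr with hct | hcdp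
            · rw [htall c hct, hcd]; omega
            · have hcne : c ≠ d := fun he => hdnm (he ▸ hcdp)
              rw [hcother c hcne]
              exact hall c hcdp
        · intro hall c hcm
          have hcne : c ≠ d := fun he => hdnm (he ▸ hcm)
          rw [← hcother c hcne]
          have : c ∈ d :: rest := by
            rw [hsplit]
            exact List.mem_cons_of_mem d (List.mem_append_right _ hcm)
          exact hall c this

-- B decides PvBalanced
lemma B_iff (s : List Char) :
    pvLoop none 0 (PySem.List.sorted (s.filter PySem.Chars.isdigit) (fun x => x) false) = true
      ↔ PvBalanced s := by
  set t := PySem.List.sorted (s.filter PySem.Chars.isdigit) (fun x => x) false with ht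
  have hpair : t.Pairwise (· ≤ ·) := by
    have := PySem.List.sorted_pairwise (s.filter PySem.Chars.isdigit) (fun x => x)
    simpa using this
  have hperm : t.Perm (s.filter PySem.Chars.isdigit) := PySem.List.sorted_perm _ _ _
  rw [pvLoop_iff t hpair]
  constructor
  · intro hall c hd hm
    have hmf : c ∈ s.filter PySem.Chars.isdigit := List.mem_filter.mpr ⟨hm, hd⟩
    have hmt : c ∈ t := (hperm.mem_iff).mpr hmf
    have := hall c hmt
    rw [hperm.count_eq, List.count_filter hd] at this
    exact this
  · intro hb c hmt
    have hmf : c ∈ s.filter PySem.Chars.isdigit := (hperm.mem_iff).mp hmt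
    obtain ⟨hms, hd⟩ := List.mem_filter.mp hmf
    rw [hperm.count_eq, List.count_filter hd]
    exact hb c hd hms

-- ===== VERDICT (by name: the statement is the Claim_ definition above) =====
theorem isBeautiful_spec : Claim_equal_isBeautiful := by
  intro n _
  unfold Spec_isBeautiful isBeautiful isBeautiful_alt
  rw [Bool.eq_iff_iff, A_iff, B_iff]
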